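-- pv_equiv track=rewrite | github.com/brewmarsh/agent-readiness-scorecard | src/agent_scorecard/dependencies.py | _canonicalize_cycles
-- ===== SOURCE A (Python) =====
-- from typing import List, Dict, Set, Tuple
--
-- def _canonicalize_cycles(cycles: List[List[str]]) -> List[List[str]]:
--     """
--     Canonicalizes cycles to remove duplicates.
--
--     Args:
--         cycles (List[List[str]]): A list of raw cycles.
--
--     Returns:
--         List[List[str]]: A list of unique, canonicalized cycles.
--     """
--     unique_cycles: List[List[str]] = []
--     seen_cycle_sets: Set[Tuple[str, ...]] = set()
--     for cycle in cycles:
--         if len(cycle) < 2: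
--             continue
--         min_node = min(cycle)
--         min_idx = cycle.index(min_node)
--         canonical = tuple(cycle[min_idx:] + cycle[:min_idx])
--         if canonical not in seen_cycle_sets:
--             seen_cycle_sets.add(canonical)
--             unique_cycles.append(list(canonical))
--     return unique_cycles
-- ===== SOURCE B (Python) =====
-- def _canonicalize_cycles(cycles):
--     """Rewrite: canonical rotation via one argmin scan + doubled-list slice,
--     then dedup by repeatedly filtering out future duplicates of the head."""
--     def canon(cycle):
--         b = 0
--         for i in range(1, len(cycle)):
--             if cycle[i] < cycle[b]:
--                 b = i
--         return (cycle + cycle)[b:b + len(cycle)]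
--
--     pending = [canon(c) for c in cycles if len(c) >= 2]
--     out = []
--     while pending:
--         head = pending[0]
--         out.append(head)
--         pending = [c for c in pending[1:] if c != head]
--     return out
-- ===== Notes on version B (the rewrite author's own statement) =====
-- stated objective: alternative
-- what changed: Replaces min()+.index()+two-slice rotation by a single explicit argmin scan with a doubled-list slice, and replaces the seen-set dedup entirely by a head-and-filter pass that repeatedly removes all future duplicates of the current head (no membership structure at all).
import Mathlib
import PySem

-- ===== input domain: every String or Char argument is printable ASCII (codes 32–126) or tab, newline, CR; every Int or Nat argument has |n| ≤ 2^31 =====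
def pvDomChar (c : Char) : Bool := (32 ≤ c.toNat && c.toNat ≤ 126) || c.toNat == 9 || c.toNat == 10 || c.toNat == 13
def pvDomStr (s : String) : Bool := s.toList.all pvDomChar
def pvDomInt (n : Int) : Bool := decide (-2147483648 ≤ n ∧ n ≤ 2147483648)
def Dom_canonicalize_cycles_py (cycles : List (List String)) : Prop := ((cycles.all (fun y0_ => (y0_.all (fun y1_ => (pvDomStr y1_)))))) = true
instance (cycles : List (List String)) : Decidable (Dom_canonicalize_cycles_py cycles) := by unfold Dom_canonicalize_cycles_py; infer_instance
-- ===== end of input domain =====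

-- B canonicalizes by an explicit single-scan argmin over the cycle plus one slice of the doubled
-- list, and dedups without any membership structure: it repeatedly emits the head of the pending
-- list and filters out all of its later duplicates ('alternative'; same result, proved below).

-- ===== PORT A =====
-- one iteration of A's fused loop: state = (unique_cycles, seen_cycle_sets)
def pvAStep (st : List (List String) × PySem.Set (List String)) (cycle : List String) :
    List (List String) × PySem.Set (List String) :=
  if cycle.length < 2 then st
  else
    match PySem.List.min? cycle (fun x => x) with
    | none => st          -- unreachable: cycle ≠ []
    | some min_node =>
      match PySem.List.index? cycle min_node with
      | none => st        -- unreachable: min_node ∈ cycle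
      | some min_idx =>
        let canonical := PySem.List.slice cycle (some (min_idx : Int)) none
            ++ PySem.List.slice cycle none (some (min_idx : Int))
        if PySem.Set.contains st.2 canonical then st
        else (st.1 ++ [canonical], PySem.Set.add st.2 canonical)

def canonicalize_cycles_py (cycles : List (List String)) : List (List String) :=
  (cycles.foldl pvAStep ([], PySem.Set.empty)).1

-- ===== PORT B =====
-- Source B's canon: argmin scan 'for i in range(1, len(cycle)): …' then (cycle+cycle)[b:b+len(cycle)]
def pvCanonB (cycle : List String) : List String :=
  let b : Int := (PySem.List.pyRange 1 (cycle.length : Int) 1).foldl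
    (fun b i => if PySem.List.pyGetD cycle i "" < PySem.List.pyGetD cycle b "" then i else b) 0
  PySem.List.slice (cycle ++ cycle) (some b) (some (b + (cycle.length : Int)))

-- Source B's while loop: emit the head, drop all later copies of it, repeat
def pvNub : List (List String) → List (List String)
  | [] => []
  | h :: t => h :: pvNub (t.filter (fun c => c != h))
termination_by l => l.length
decreasing_by simpa using Nat.lt_succ_of_le (List.length_filter_le _ t)

def canonicalize_cycles_py_alt (cycles : List (List String)) : List (List String) :=
  pvNub ((cycles.filter (fun c => decide (2 ≤ c.length))).map pvCanonB)

-- ===== PRECONDITION & SPEC =====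
def Spec_canonicalize_cycles_py (cycles : List (List String)) (out : List (List String)) : Prop := out = canonicalize_cycles_py_alt cycles
instance (cycles : List (List String)) (out : List (List String)) : Decidable (Spec_canonicalize_cycles_py cycles out) := by unfold Spec_canonicalize_cycles_py; infer_instance

-- ===== CLAIM (what is proved, stated in full; the proofs are below) =====
def Claim_equal_canonicalize_cycles_py : Prop := ∀ (cycles : List (List String)), Dom_canonicalize_cycles_py cycles → Spec_canonicalize_cycles_py cycles (canonicalize_cycles_py cycles)

-- ===== LEMMAS AND PROOFS =====

-- proof-side description of one A-body step: the canonical rotation of a cycle, if kept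
def pvCanonOf (cycle : List String) : Option (List String) :=
  if cycle.length < 2 then none
  else
    match PySem.List.min? cycle (fun x => x) with
    | none => none
    | some m =>
      match PySem.List.index? cycle m with
      | none => none
      | some i =>
        some (PySem.List.slice cycle (some (i : Int)) none
            ++ PySem.List.slice cycle none (some (i : Int)))

lemma pvAStep_eq (s : List (List String)) (cycle : List String) :
    pvAStep (s, s) cycle =
      (let r := (pvCanonOf cycle).toList.foldl PySem.Set.add s; (r, r)) := by
  unfold pvAStep pvCanonOf
  split_ifs with h
  · simp
  · cases PySem.List.min? cycle (fun x => x) with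
    | none => simp
    | some m =>
      simp only [PySem.List.index?_eq_idxOf?]
      cases List.idxOf? m cycle with
      | none => simp
      | some i =>
        simp only [PySem.Set.add, PySem.Set.contains]
        split_ifs with hc <;> simp_all

lemma pvA_fold_eq (cycles : List (List String)) (s : List (List String)) :
    cycles.foldl pvAStep (s, s) =
      (let r := (cycles.flatMap (fun c => (pvCanonOf c).toList)).foldl PySem.Set.add s; (r, r)) := by
  induction cycles generalizing s with
  | nil => simp
  | cons c t ih =>
    rw [List.foldl_cons, pvAStep_eq]
    simp only [List.flatMap_cons, List.foldl_append]
    exact ih _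

-- the argmin scan of Source B finds the first index of a minimal element
lemma pvArgmin_spec (cycle : List String) (k : Nat) (hk1 : 1 ≤ k) (hk : k ≤ cycle.length) :
    ∃ (bn : Nat) (_ : bn < k),
      ((PySem.List.pyRange 1 (k : Int) 1).foldl
        (fun b i => if PySem.List.pyGetD cycle i "" < PySem.List.pyGetD cycle b "" then i else b) 0)
        = (bn : Int)
      ∧ (∀ j (hj : j < k), cycle[bn]'(by omega) ≤ cycle[j]'(by omega))
      ∧ (∀ j (hj : j < bn), cycle[bn]'(by omega) < cycle[j]'(by omega)) := by
  induction k with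
  | zero => omega
  | succ k ih =>
    by_cases hk1' : k = 0
    · subst hk1'
      refine ⟨0, by omega, ?_, ?_, ?_⟩
      · rw [show (((0:Nat)+1 : Nat) : Int) = 1 by norm_num, PySem.List.pyRange_one_eq_nil (by norm_num)]
        simp
      · intro j hj; interval_cases j; exact le_refl _
      · intro j hj; omega
    · obtain ⟨bn, hbn, hfold, hmin, hstrict⟩ := ih (by omega) (by omega)
      rw [show ((k+1 : Nat) : Int) = (k : Int) + 1 by push_cast; ring,
          PySem.List.pyRange_one_succ_right (by exact_mod_cast Nat.one_le_iff_ne_zero.mpr hk1'),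
          List.foldl_append, hfold]
      simp only [List.foldl_cons, List.foldl_nil]
      have hkc : PySem.List.pyGetD cycle (k : Int) "" = cycle[k]'(by omega) := by
        rw [PySem.List.pyGetD_natCast, List.getD_eq_getElem?_getD, List.getElem?_eq_getElem (by omega)]
        rfl
      have hbc : PySem.List.pyGetD cycle (bn : Int) "" = cycle[bn]'(by omega) := by
        rw [PySem.List.pyGetD_natCast, List.getD_eq_getElem?_getD, List.getElem?_eq_getElem (by omega)]
        rfl
      rw [hkc, hbc]
      by_cases hlt : cycle[k]'(by omega) < cycle[bn]'(by omega)
      · refine ⟨k, by omega, by rw [if_pos hlt], ?_, ?_⟩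
        · intro j hj
          rcases Nat.lt_succ_iff_lt_or_eq.mp hj with hj' | hj'
          · exact le_of_lt (lt_of_lt_of_le hlt (hmin j hj'))
          · subst hj'; exact le_refl _
        · intro j hj
          exact lt_of_lt_of_le hlt (hmin j hj)
      · refine ⟨bn, by omega, by rw [if_neg hlt], ?_, hstrict⟩
        intro j hj
        rcases Nat.lt_succ_iff_lt_or_eq.mp hj with hj' | hj'
        · exact hmin j hj'
        · subst hj'; exact not_lt.mp hlt

-- the doubled-list slice is the two-slice rotation
lemma pvRot_eq (cycle : List String) (i : Nat) (hi : i < cycle.length) :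
    PySem.List.slice (cycle ++ cycle) (some (i : Int)) (some ((i : Int) + (cycle.length : Int)))
      = cycle.drop i ++ cycle.take i := by
  rw [show ((i : Int) + (cycle.length : Int)) = ((i + cycle.length : Nat) : Int) by push_cast; ring,
      PySem.List.slice_natCast, List.drop_append_of_le_length (le_of_lt hi),
      show i + cycle.length - i = cycle.length from by omega, List.take_append]
  congr 1
  · exact List.take_of_length_le (by simp)
  · rw [List.length_drop]; congr 1; omega

-- the two canonicalizations agree on every kept cycle
lemma pvCanonOf_eq_canonB (cycle : List String) (h : ¬ cycle.length < 2) :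
    pvCanonOf cycle = some (pvCanonB cycle) := by
  have hne : cycle ≠ [] := by
    intro hnil; rw [hnil] at h; simp at h
  unfold pvCanonOf
  rw [if_neg h]
  cases hmin : PySem.List.min? cycle (fun x => x) with
  | none => exact absurd ((PySem.List.min?_eq_none_iff _ _).mp hmin) hne
  | some m =>
    have hmem : m ∈ cycle := PySem.List.min?_mem hmin
    cases hidx : PySem.List.index? cycle m with
    | none => exact absurd ((PySem.List.index?_eq_none_iff _ _).mp hidx) (by simpa using hmem)
    | some i =>
      obtain ⟨hi, hiv, hifirst⟩ := PySem.List.getElem_of_index?_eq_some hidx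
      have hminle : ∀ j (hj : j < cycle.length), cycle[i] ≤ cycle[j] := by
        intro j hj
        rw [hiv]
        exact PySem.List.min?_isMin hmin _ (List.getElem_mem hj)
      obtain ⟨bn, hbn, hfold, hmin2, hstrict⟩ :=
        pvArgmin_spec cycle cycle.length (by omega) (le_refl _)
      have hib : i = bn := by
        rcases Nat.lt_trichotomy i bn with hlt | heq | hgt
        · exact absurd (lt_of_lt_of_le (hstrict i hlt) (hminle bn hbn)) (lt_irrefl _)
        · exact heq
        · -- bn < i : cycle[bn] would be an earlier occurrence of the minimum
          have h1 : cycle[i] ≤ cycle[bn]'(by omega) := hminle bn hbn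
          have h2 : cycle[bn]'(by omega) ≤ cycle[i] := hmin2 i hi
          have : cycle[bn]'(by omega) = m := by rw [← hiv]; exact le_antisymm h2 h1
          exact absurd this (hifirst bn hgt)
      simp only [hidx, pvCanonB]
      rw [hfold, ← hib, pvRot_eq cycle i hi,
          PySem.List.slice_from_natCast, PySem.List.slice_to_natCast]

-- list of all canonical forms, in order: A's per-cycle options = B's first pass
lemma pvFlatMap_eq_map_filter (cycles : List (List String)) :
    cycles.flatMap (fun c => (pvCanonOf c).toList)
      = (cycles.filter (fun c => decide (2 ≤ c.length))).map pvCanonB := by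
  induction cycles with
  | nil => rfl
  | cons c t ih =>
    by_cases h : c.length < 2
    · have hc : pvCanonOf c = none := by unfold pvCanonOf; rw [if_pos h]
      rw [List.flatMap_cons, List.filter_cons_of_neg (by simpa using h), hc]
      simpa using ih
    · rw [List.flatMap_cons, List.filter_cons_of_pos (by simpa using not_lt.mp h),
          pvCanonOf_eq_canonB c h, List.map_cons]
      simpa using ih

-- inserting into a set, one already-present head pulled out front
lemma pvFoldl_add_cons (t : List (List String)) (h : List String) (acc : List (List String)) :
    t.foldl PySem.Set.add (h :: acc)
      = h :: (t.filter (fun c => c != h)).foldl PySem.Set.add acc := by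
  induction t generalizing acc with
  | nil => rfl
  | cons a t ih =>
    by_cases hah : a = h
    · subst hah
      rw [List.foldl_cons, List.filter_cons_of_neg (by simp),
          show PySem.Set.add (a :: acc) a = a :: acc by simp [PySem.Set.add]]
      exact ih acc
    · rw [List.foldl_cons, List.filter_cons_of_pos (by simp [hah]), List.foldl_cons,
          show PySem.Set.add (h :: acc) a = h :: PySem.Set.add acc a by
            simp [PySem.Set.add, PySem.Set.contains, hah]
            split_ifs <;> rfl]
      exact ih _

-- ordered dedup (dict.fromkeys / A's seen-set) = Source B's head-and-filter loop
lemma pvDedup_eq_pvNub : ∀ xs : List (List String), PySem.Set.ofList xs = pvNub xs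
  | [] => by rw [pvNub]; rfl
  | h :: t => by
    rw [pvNub, PySem.Set.ofList_eq_foldl, List.foldl_cons,
        show PySem.Set.add [] h = [h] from rfl,
        pvFoldl_add_cons t h [], ← PySem.Set.ofList_eq_foldl,
        pvDedup_eq_pvNub (t.filter (fun c => c != h))]
termination_by xs => xs.length
decreasing_by simpa using Nat.lt_succ_of_le (List.length_filter_le _ t)

-- ===== VERDICT (by name: the statement is the Claim_ definition above) =====
theorem canonicalize_cycles_py_spec : Claim_equal_canonicalize_cycles_py := by
  intro cycles _
  show canonicalize_cycles_py cycles = canonicalize_cycles_py_alt cycles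
  unfold canonicalize_cycles_py canonicalize_cycles_py_alt
  rw [show (PySem.Set.empty : PySem.Set (List String)) = ([] : List (List String)) from rfl,
      pvA_fold_eq, pvFlatMap_eq_map_filter]
  rw [← pvDedup_eq_pvNub, PySem.Set.ofList_eq_foldl]
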